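-- pv_equiv track=rewrite | github.com/Chekinm/Code-wars | Problems-from-web/differential_generator.py | delta_with_for
-- ===== SOURCE A (Python) =====
-- from collections import deque
--
-- def delta_with_for(values, n):
--     deq = deque()
--     for val in values:
--         if len(deq) > n:
--             yield deq.popleft()
--         deq.append(val)
--         for i in range(len(deq)-2, -1, -1):
--             deq[i] = deq[i+1] - deq[i]
--     yield deq.popleft()
-- ===== SOURCE B (Python) =====
-- def delta_with_for(values, n):
--     vals = list(values)
--     k = min(n, len(vals) - 1)
--     for _ in range(k):
--         vals = [b - a for a, b in zip(vals, vals[1:])]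
--     yield vals.pop(0)
--     yield from vals
-- ===== Notes on version B (the rewrite author's own statement) =====
-- stated objective: simpler
-- what changed: Replaces the streaming deque difference-table (incremental right-to-left in-place updates per incoming value) with min(n, len-1) whole-list pairwise-difference passes over a materialized list.
import Mathlib
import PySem

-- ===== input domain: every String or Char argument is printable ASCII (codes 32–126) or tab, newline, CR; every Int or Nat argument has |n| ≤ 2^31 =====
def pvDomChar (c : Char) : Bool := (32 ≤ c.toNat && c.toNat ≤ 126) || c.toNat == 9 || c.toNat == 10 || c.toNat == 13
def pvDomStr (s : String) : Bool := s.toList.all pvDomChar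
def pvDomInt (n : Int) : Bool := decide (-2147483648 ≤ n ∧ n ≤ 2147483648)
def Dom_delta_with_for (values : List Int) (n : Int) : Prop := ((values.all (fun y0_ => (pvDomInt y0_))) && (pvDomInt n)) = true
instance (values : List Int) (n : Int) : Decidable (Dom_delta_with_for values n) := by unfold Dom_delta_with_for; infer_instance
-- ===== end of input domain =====

-- B replaces A's streaming deque difference-table with min(n, len-1) whole-list pairwise-difference
-- passes (simpler decomposition, same cost). Equivalence is about the generators' yielded sequences.

-- ===== PORT A =====
-- inner loop 'for i in range(len(deq)-2, -1, -1): deq[i] = deq[i+1] - deq[i]' processed right to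
-- left: each cell is set to the ALREADY-UPDATED right neighbour minus its old value — exact.
def aInner : List Int → List Int
  | [] => []
  | [x] => [x]
  | x :: y :: rest =>
      let r := aInner (y :: rest)
      (r.headD 0 - x) :: r

-- one iteration of A's 'for val in values' body; st = (yielded so far, deq)
def aStep (n : Int) (st : List Int × List Int) (v : Int) : List Int × List Int :=
  let st' := if (st.2.length : Int) > n then (st.1 ++ st.2.take 1, st.2.drop 1) else st
  (st'.1, aInner (st'.2 ++ [v]))

-- the list of all values the generator yields; the final 'yield deq.popleft()' raises IndexError
-- exactly when deq is empty (values = [], or a popleft on an empty deque already raised, n < 0) —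
-- those inputs are excluded by Pre_ below
def delta_with_for (values : List Int) (n : Int) : List Int :=
  let st := values.foldl (aStep n) ([], [])
  st.1 ++ st.2.take 1

-- ===== PORT B =====
-- '[b - a for a, b in zip(vals, vals[1:])]'
def bPass (vals : List Int) : List Int := List.zipWith (fun a b => b - a) vals vals.tail

-- k difference passes, then 'yield vals.pop(0); yield from vals' yields the whole list (pop(0)
-- raises IndexError only on values = [], excluded by Pre_)
def delta_with_for_alt (values : List Int) (n : Int) : List Int :=
  let k := min n ((values.length : Int) - 1)
  bPass^[k.toNat] values

-- ===== PRECONDITION & SPEC =====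
-- A raises IndexError (popleft from an empty deque) exactly when values is empty or n < 0.
def Pre_delta_with_for (values : List Int) (n : Int) : Prop := values ≠ [] ∧ 0 ≤ n
instance (values : List Int) (n : Int) : Decidable (Pre_delta_with_for values n) := by unfold Pre_delta_with_for; infer_instance
def pvWitness_delta_with_for : List Int × Int := ([1, 3, 6, 10], 2)

def Spec_delta_with_for (values : List Int) (n : Int) (out : List Int) : Prop := out = delta_with_for_alt values n
instance (values : List Int) (n : Int) (out : List Int) : Decidable (Spec_delta_with_for values n out) := by unfold Spec_delta_with_for; infer_instance

-- ===== CLAIM (what is proved, stated in full; the proofs are below) =====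
def Claim_equal_delta_with_for : Prop := ∀ (values : List Int) (n : Int), Dom_delta_with_for values n → Pre_delta_with_for values n → Spec_delta_with_for values n (delta_with_for values n)

-- ===== LEMMAS AND PROOFS =====

-- last entry of the k-th difference pass of p (0 if it is empty)
def dg (k : Nat) (p : List Int) : Int := (bPass^[k] p).getLastD 0

-- the anti-diagonal [dg (L-1) p, …, dg 1 p, dg 0 p] of the difference table
def diag : Nat → List Int → List Int
  | 0, _ => []
  | (L + 1), p => dg L p :: diag L p

-- A's deque after processing prefix p, with nn = n.toNat
def DEQ (nn : Nat) (p : List Int) : List Int := diag (min (nn + 1) p.length) p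

-- A's yields after processing prefix p
def OUT (nn : Nat) (p : List Int) : List Int :=
  if nn + 1 ≤ p.length then (bPass^[nn] p).dropLast else []

theorem bPass_length (xs : List Int) : (bPass xs).length = xs.length - 1 := by
  simp [bPass]

theorem bPass_append_last (p : List Int) (v : Int) (h : p ≠ []) :
    bPass (p ++ [v]) = bPass p ++ [v - p.getLastD 0] := by
  induction p with
  | nil => simp at h
  | cons x t ih =>
    cases t with
    | nil => simp [bPass]
    | cons y t' =>
      have := ih (by simp)
      simp only [bPass, List.cons_append, List.tail_cons, List.zipWith_cons_cons] at this ⊢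
      simp [this]

theorem iterate_length (k : Nat) (p : List Int) (h : k ≤ p.length) :
    (bPass^[k] p).length = p.length - k := by
  induction k with
  | zero => simp
  | succ m ih =>
    rw [Function.iterate_succ_apply', bPass_length, ih (by omega)]
    omega

theorem iterate_append (k : Nat) (p : List Int) (v : Int) (h : k ≤ p.length) :
    bPass^[k] (p ++ [v]) = bPass^[k] p ++ [dg k (p ++ [v])] := by
  induction k with
  | zero => simp [dg]
  | succ m ih =>
    have hne : bPass^[m] p ≠ [] := by
      have := iterate_length m p (by omega)
      intro hnil; rw [hnil] at this; simp at this; omega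
    have E : bPass^[m+1] (p ++ [v]) = bPass (bPass^[m] p) ++ [dg m (p ++ [v]) - dg m p] := by
      rw [Function.iterate_succ_apply', ih (by omega), bPass_append_last _ _ hne]
      simp [dg]
    rw [E, Function.iterate_succ_apply']
    congr 1
    simp only [dg]
    rw [E]
    simp [dg, List.getLastD_eq_getLast?]

theorem dg_succ (k : Nat) (p : List Int) (v : Int) (h : k < p.length) :
    dg (k + 1) (p ++ [v]) = dg k (p ++ [v]) - dg k p := by
  have hne : bPass^[k] p ≠ [] := by
    have := iterate_length k p (by omega)
    intro hnil; rw [hnil] at this; simp at this; omega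
  have E : bPass^[k+1] (p ++ [v]) = bPass (bPass^[k] p) ++ [dg k (p ++ [v]) - dg k p] := by
    rw [Function.iterate_succ_apply', iterate_append k p v (by omega), bPass_append_last _ _ hne]
    simp [dg]
  simp only [dg]
  rw [E]
  simp [dg, List.getLastD_eq_getLast?]

theorem diag_length (L : Nat) (p : List Int) : (diag L p).length = L := by
  induction L with
  | zero => rfl
  | succ m ih => simp [diag, ih]

theorem aInner_cons (x : Int) (t : List Int) (h : t ≠ []) :
    aInner (x :: t) = ((aInner t).headD 0 - x) :: aInner t := by
  cases t with
  | nil => simp at h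
  | cons y t' => rfl

theorem dg_eq_getLast (k : Nat) (p : List Int) (h : bPass^[k] p ≠ []) :
    dg k p = (bPass^[k] p).getLast h := by
  simp [dg, List.getLastD_eq_getLast?, List.getLast?_eq_some_getLast h]

-- the effect of A's inner right-to-left update loop on the deque = one new difference-table diagonal
theorem aInner_diag (L : Nat) (p : List Int) (v : Int) (h : L ≤ p.length) :
    aInner (diag L p ++ [v]) = diag (L + 1) (p ++ [v]) := by
  induction L with
  | zero => simp [diag, aInner, dg]
  | succ m ih =>
    rw [diag, List.cons_append, aInner_cons _ _ (by simp), ih (by omega)]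
    rw [diag, diag]
    simp only [List.headD_cons]
    rw [dg_succ m p v (by omega)]
    simp [diag]

-- the loop invariant of A's 'for val in values' loop
theorem fold_inv (n : Int) (hn : 0 ≤ n) (p : List Int) :
    p.foldl (aStep n) ([], []) = (OUT n.toNat p, DEQ n.toNat p) := by
  induction p using List.reverseRecOn with
  | nil => simp [OUT, DEQ, diag]
  | append_singleton q v ih =>
    rw [List.foldl_append, List.foldl_cons, List.foldl_nil, ih]
    have hcast : n = (n.toNat : Int) := by omega
    by_cases hm : n.toNat + 1 ≤ q.length
    · -- deque already holds n+1 entries: yield its head, pop it, then update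
      have hminq : min (n.toNat + 1) q.length = n.toNat + 1 := by omega
      have hdq : DEQ n.toNat q = dg n.toNat q :: diag n.toNat q := by rw [DEQ, hminq, diag]
      have hc : ((DEQ n.toNat q).length : Int) > n := by
        rw [DEQ, diag_length, hminq, hcast]
        exact_mod_cast Nat.lt_succ_self _
      have hXne : bPass^[n.toNat] q ≠ [] := by
        have := iterate_length n.toNat q (by omega)
        intro hnil; rw [hnil] at this; simp at this; omega
      simp only [aStep, hc, if_pos]
      refine Prod.ext ?_ ?_
      · -- out ++ [popped head] = full n-th difference list of the new prefix, minus its last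
        show OUT n.toNat q ++ (DEQ n.toNat q).take 1 = OUT n.toNat (q ++ [v])
        rw [hdq, OUT, if_pos hm, OUT, if_pos (by simp only [List.length_append, List.length_cons, List.length_nil]; omega),
          iterate_append n.toNat q v (by omega), List.dropLast_concat]
        simp only [List.take_succ_cons, List.take_zero]
        rw [dg_eq_getLast _ _ hXne, List.dropLast_append_getLast]
      · show aInner ((DEQ n.toNat q).drop 1 ++ [v]) = DEQ n.toNat (q ++ [v])
        rw [hdq]
        simp only [List.drop_succ_cons, List.drop_zero]
        rw [aInner_diag n.toNat q v (by omega), DEQ]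
        congr 1
        simp only [List.length_append, List.length_cons, List.length_nil]
        omega
    · -- deque still short (≤ n entries): no yield, just append and update
      have hminq : min (n.toNat + 1) q.length = q.length := by omega
      have hc : ¬ ((DEQ n.toNat q).length : Int) > n := by
        rw [DEQ, diag_length, hminq, hcast]
        omega
      simp only [aStep, hc, if_neg, not_false_iff]
      refine Prod.ext ?_ ?_
      · show OUT n.toNat q = OUT n.toNat (q ++ [v])
        rw [OUT, if_neg hm, OUT]
        split
        · next hle =>
          have hlen2 : n.toNat = q.length := by
            simp only [List.length_append, List.length_cons, List.length_nil] at hle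
            omega
          have h1 : (bPass^[n.toNat] (q ++ [v])).length = 1 := by
            rw [iterate_length n.toNat (q ++ [v]) (by simp only [List.length_append, List.length_cons, List.length_nil]; omega)]
            simp only [List.length_append, List.length_cons, List.length_nil]
            omega
          have : ((bPass^[n.toNat] (q ++ [v])).dropLast).length = 0 := by
            simp [h1]
          exact (List.eq_nil_of_length_eq_zero this).symm
        · rfl
      · show aInner (DEQ n.toNat q ++ [v]) = DEQ n.toNat (q ++ [v])
        rw [DEQ, hminq, aInner_diag q.length q v (le_refl _), DEQ]
        congr 1
        simp only [List.length_append, List.length_cons, List.length_nil]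
        omega

-- ===== VERDICT (by name: the statement is the Claim_ definition above) =====
theorem delta_with_for_spec : Claim_equal_delta_with_for := by
  intro values n _ hpre
  obtain ⟨hne, hn⟩ := hpre
  unfold Spec_delta_with_for delta_with_for delta_with_for_alt
  rw [fold_inv n hn values]
  show OUT n.toNat values ++ List.take 1 (DEQ n.toNat values)
      = bPass^[(min n ((values.length : Int) - 1)).toNat] values
  have hm1 : 1 ≤ values.length := List.length_pos_iff.mpr hne
  by_cases hm : n.toNat + 1 ≤ values.length
  · -- n < len: the result is the full n-th difference list
    have hk : (min n ((values.length : Int) - 1)).toNat = n.toNat := by omega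
    rw [hk, DEQ, OUT, if_pos hm]
    have : min (n.toNat + 1) values.length = n.toNat + 1 := by omega
    rw [this, diag]
    simp only [List.take_succ_cons, List.take_zero]
    have hXne : bPass^[n.toNat] values ≠ [] := by
      have := iterate_length n.toNat values (by omega)
      intro hnil; rw [hnil] at this; simp at this; omega
    rw [dg_eq_getLast _ _ hXne, List.dropLast_append_getLast]
  · -- n ≥ len: a single value, the (len-1)-th difference
    have hk : (min n ((values.length : Int) - 1)).toNat = values.length - 1 := by omega
    rw [hk, DEQ, OUT, if_neg hm]
    have : min (n.toNat + 1) values.length = (values.length - 1) + 1 := by omega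
    rw [this, diag]
    simp only [List.nil_append, List.take_succ_cons, List.take_zero]
    have h1 : (bPass^[values.length - 1] values).length = 1 := by
      rw [iterate_length _ _ (by omega)]
      omega
    obtain ⟨a, ha⟩ : ∃ a, bPass^[values.length - 1] values = [a] := by
      cases hx : bPass^[values.length - 1] values with
      | nil => rw [hx] at h1; simp at h1
      | cons b t =>
        rw [hx] at h1
        simp at h1
        exact ⟨b, by rw [h1]⟩
    rw [ha, dg, ha]
    rfl
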